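-- pv_equiv track=rewrite | github.com/Shab00/codingProblems | codfinity/itdn.py | solve
-- ===== SOURCE A (Python) =====
-- def solve(a:int, b:int, c:int) -> int:
--     nums = [a, b, c]
--     dic = {}
--     for i in nums:
--         if i not in dic:
--             dic[i] = 1
--         else:
--             dic[i] += 1
--     mink = min(dic, key=dic.get)
--
--     return mink
-- ===== SOURCE B (Python) =====
-- def solve(a: int, b: int, c: int) -> int:
--     if a == b:
--         return c
--     if a == c:
--         return b
--     return a
-- ===== Notes on version B (the rewrite author's own statement) =====
-- stated objective: simpler
-- what changed: Replaced the frequency dict and min-by-count scan with a three-way comparison cascade exploiting that there are exactly three values; tie-breaking (first-inserted minimal key) is preserved.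
import Mathlib
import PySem

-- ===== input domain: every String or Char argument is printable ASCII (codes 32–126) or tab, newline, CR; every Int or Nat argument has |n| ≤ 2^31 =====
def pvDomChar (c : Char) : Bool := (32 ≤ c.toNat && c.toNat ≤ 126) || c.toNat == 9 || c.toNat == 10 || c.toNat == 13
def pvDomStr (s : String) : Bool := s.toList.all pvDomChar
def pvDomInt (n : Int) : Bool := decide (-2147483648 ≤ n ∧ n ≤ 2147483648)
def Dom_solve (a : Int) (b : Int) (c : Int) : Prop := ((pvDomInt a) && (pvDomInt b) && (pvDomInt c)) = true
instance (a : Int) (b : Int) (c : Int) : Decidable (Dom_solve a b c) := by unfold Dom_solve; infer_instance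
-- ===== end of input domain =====

-- B replaces the frequency dict and min-by-count scan with a direct three-way
-- comparison cascade (simpler); return values agree on all inputs, including ties.
-- ===== PORT A =====
def solve (a : Int) (b : Int) (c : Int) : Int :=
  let nums : List Int := [a, b, c]
  let dic : PySem.Dict Int Int :=
    nums.foldl (fun d i =>
      if ¬ d.contains i then d.insert i 1 else d.modify i 0 (· + 1))
      PySem.Dict.empty
  -- min(dic, key=dic.get): first key with minimal count; keys are nonempty so getD 0 is never used
  (PySem.List.min? dic.keys (fun k => dic.getD k 0)).getD 0

-- ===== PORT B =====
def solve_alt (a : Int) (b : Int) (c : Int) : Int :=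
  if a == b then c
  else if a == c then b
  else a

-- ===== PRECONDITION & SPEC =====
def Spec_solve (a : Int) (b : Int) (c : Int) (out : Int) : Prop := out = solve_alt a b c
instance (a : Int) (b : Int) (c : Int) (out : Int) : Decidable (Spec_solve a b c out) := by unfold Spec_solve; infer_instance

-- ===== CLAIM (what is proved, stated in full; the proofs are below) =====
def Claim_equal_solve : Prop := ∀ (a : Int) (b : Int) (c : Int), Dom_solve a b c → Spec_solve a b c (solve a b c)

-- ===== LEMMAS AND PROOFS =====

-- ===== VERDICT (by name: the statement is the Claim_ definition above) =====
theorem solve_spec : Claim_equal_solve := by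
  intro a b c _
  unfold Spec_solve solve solve_alt
  by_cases h1 : a = b <;> by_cases h2 : a = c <;> by_cases h3 : b = c <;>
    simp_all [PySem.Dict.contains, PySem.Dict.insert, PySem.Dict.modify,
      PySem.Dict.empty, PySem.Dict.keys, PySem.Dict.getD, PySem.Dict.get?,
      PySem.List.min?, h1, h2]
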